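-- pv_equiv track=rewrite | github.com/runnerup96/EHRSQL-text2sql-solution | ehrsql_solution/support_functions.py | get_all_consequtive_words_from_str
-- ===== SOURCE A (Python) =====
-- def get_all_consequtive_words_from_str(word_list):
--     substring_list = []
--     for i in range(len(word_list)):
--         for j in range(i + 1, len(word_list) + 1):
--             word_substring = word_list[i:j]
--             substring_list.append(word_substring)
--     substring_set = set([" ".join(a) for a in substring_list])
--     return substring_set
-- ===== SOURCE B (Python) =====
-- def get_all_consequtive_words_from_str(word_list):
--     result = set()
--     for i in range(len(word_list)):
--         cur = word_list[i]
--         result.add(cur)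
--         for j in range(i + 1, len(word_list)):
--             cur = cur + " " + word_list[j]
--             result.add(cur)
--     return result
-- ===== Notes on version B (the rewrite author's own statement) =====
-- stated objective: alternative
-- what changed: Instead of collecting every slice word_list[i:j] into a list and re-joining each from scratch, B keeps one running accumulator string per start index, extending it word by word and adding each extension directly to the set, with no intermediate list or slices.
import Mathlib
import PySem

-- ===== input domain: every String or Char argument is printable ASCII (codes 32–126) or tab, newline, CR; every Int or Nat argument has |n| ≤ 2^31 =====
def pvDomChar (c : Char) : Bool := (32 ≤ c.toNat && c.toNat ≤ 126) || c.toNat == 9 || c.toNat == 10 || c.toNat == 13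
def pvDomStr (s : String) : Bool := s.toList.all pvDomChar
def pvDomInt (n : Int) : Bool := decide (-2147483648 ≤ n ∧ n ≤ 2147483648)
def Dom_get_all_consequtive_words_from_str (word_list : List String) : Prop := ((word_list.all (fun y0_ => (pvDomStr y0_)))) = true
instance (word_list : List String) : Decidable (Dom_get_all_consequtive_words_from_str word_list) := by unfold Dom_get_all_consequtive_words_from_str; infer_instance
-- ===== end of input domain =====

-- B replaces A's re-slicing and re-joining of word_list[i:j] for every pair (i, j) by one
-- incrementally extended accumulator string per start index, added to the set as it grows
-- (objective: alternative — same set, built without intermediate lists or slices).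

-- ===== PORT A =====
-- literal transliteration of A: nested index loops collecting slices, then set of the joins
def get_all_consequtive_words_from_str (word_list : List String) : List String :=
  let substring_list :=
    (PySem.List.pyRange 0 (PySem.List.len word_list) 1).foldl
      (fun acc i =>
        (PySem.List.pyRange (i + 1) (PySem.List.len word_list + 1) 1).foldl
          (fun acc2 j => acc2 ++ [PySem.List.slice word_list (some i) (some j)]) acc)
      []
  PySem.Set.ofList (substring_list.map (fun a => PySem.Str.join " " a))

-- ===== PORT B =====
-- inner loop of B: extend cur by " " + next word and add each extension to the set
def pvExtend : String → List String → PySem.Set String → PySem.Set String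
  | _, [], s => s
  | cur, w :: ws, s =>
      let cur' := PySem.Str.join " " [cur, w]
      pvExtend cur' ws (PySem.Set.add s cur')

-- outer loop of B: for each start position, seed cur with that word
def pvOuter : List String → PySem.Set String → PySem.Set String
  | [], s => s
  | w :: ws, s => pvOuter ws (pvExtend w ws (PySem.Set.add s w))

def get_all_consequtive_words_from_str_alt (word_list : List String) : List String :=
  pvOuter word_list PySem.Set.empty

-- ===== PRECONDITION & SPEC =====
def Spec_get_all_consequtive_words_from_str (word_list : List String) (out : List String) : Prop := out = get_all_consequtive_words_from_str_alt word_list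
instance (word_list : List String) (out : List String) : Decidable (Spec_get_all_consequtive_words_from_str word_list out) := by unfold Spec_get_all_consequtive_words_from_str; infer_instance

-- ===== CLAIM (what is proved, stated in full; the proofs are below) =====
def Claim_equal_get_all_consequtive_words_from_str : Prop := ∀ (word_list : List String), Dom_get_all_consequtive_words_from_str word_list → Spec_get_all_consequtive_words_from_str word_list (get_all_consequtive_words_from_str word_list)

-- ===== LEMMAS AND PROOFS =====

-- the strings B's inner loop adds, in order
def pvJoins : String → List String → List String
  | _, [] => []
  | cur, w :: ws =>
      let c := PySem.Str.join " " [cur, w]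
      c :: pvJoins c ws

-- all strings B adds, in order (one row per start position)
def pvRows : List String → List String
  | [] => []
  | w :: ws => (w :: pvJoins w ws) ++ pvRows ws

theorem pv_join_singleton (a s : String) : PySem.Str.join s [a] = a := by
  simp [PySem.Str.join, PySem.Chars.join, List.intercalate]

theorem pv_join_cons_cons (s a b : String) (l : List String) :
    PySem.Str.join s (PySem.Str.join s [a, b] :: l) = PySem.Str.join s (a :: b :: l) := by
  simp only [PySem.Str.join, PySem.Chars.join, List.map, String.toList_ofList]
  cases l <;> simp [List.intercalate]

theorem pvExtend_eq (ws : List String) : ∀ (cur : String) (s : PySem.Set String),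
    pvExtend cur ws s = (pvJoins cur ws).foldl PySem.Set.add s := by
  induction ws with
  | nil => intro cur s; rfl
  | cons w ws ih => intro cur s; simp [pvExtend, pvJoins, ih]

theorem pvOuter_eq (wl : List String) : ∀ (s : PySem.Set String),
    pvOuter wl s = (pvRows wl).foldl PySem.Set.add s := by
  induction wl with
  | nil => intro s; rfl
  | cons w ws ih =>
      intro s
      simp [pvOuter, pvRows, ih, pvExtend_eq, List.foldl_append, List.foldl_cons]

theorem pvJoins_eq (ws : List String) : ∀ (cur : String),
    pvJoins cur ws = (List.range ws.length).map
      (fun k => PySem.Str.join " " (cur :: ws.take (k + 1))) := by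
  induction ws with
  | nil => intro cur; rfl
  | cons w ws ih =>
      intro cur
      simp only [pvJoins, List.length_cons, List.range_succ_eq_map, List.map_cons, List.map_map,
        List.cons.injEq]
      refine ⟨by simp [List.take], ?_⟩
      rw [ih]
      apply List.map_congr_left
      intro k _
      simp only [Function.comp, List.take_succ_cons]
      exact pv_join_cons_cons " " cur w _

-- A's joined substrings starting at position i, over the suffix
theorem pv_main (xs : List String) :
    (List.range xs.length).flatMap
      (fun i => (List.range (xs.length - i)).map
        (fun t => PySem.Str.join " " ((xs.drop i).take (t + 1)))) = pvRows xs := by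
  induction xs with
  | nil => rfl
  | cons w ws ih =>
      simp only [List.length_cons, List.range_succ_eq_map, List.flatMap_cons, List.flatMap_map]
      rw [pvRows]
      congr 1
      · -- row for start index 0
        rw [pvJoins_eq]
        simp only [Nat.sub_zero, List.drop_zero, List.range_succ_eq_map, List.map_cons,
          List.map_map]
        simp only [List.cons.injEq]
        refine ⟨by simp [List.take, pv_join_singleton], ?_⟩
        apply List.map_congr_left
        intro k _
        simp [Function.comp, List.take]
      · rw [← ih]
        congr 1
        funext i
        simp [Nat.succ_sub_succ]

theorem pv_A_eq (wl : List String) :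
    get_all_consequtive_words_from_str wl = PySem.Set.ofList (pvRows wl) := by
  rw [← pv_main wl]
  unfold get_all_consequtive_words_from_str
  simp only [PySem.List.foldl_append_singleton_eq_map, PySem.List.foldl_append_eq_flatMap,
    List.nil_append]
  congr 1
  rw [List.map_flatMap]
  rw [PySem.List.pyRange_one, PySem.List.len_eq]
  simp only [Int.sub_zero, Int.toNat_natCast, List.flatMap_map]
  apply List.flatMap_congr
  intro i hi
  simp only [List.mem_range] at hi
  rw [PySem.List.pyRange_one]
  have h1 : ((wl.length : Int) + 1 - (0 + (i:Int) + 1)).toNat = wl.length - i := by omega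
  rw [h1, List.map_map, List.map_map]
  apply List.map_congr_left
  intro t ht
  simp only [List.mem_range] at ht
  simp only [Function.comp]
  have h2 : (0 + (i:Int)) = ((i:Nat):Int) := by omega
  rw [h2]
  have h3 : ((i:Int) + 1 + (t:Int)) = (((i+1+t:Nat)):Int) := by push_cast; ring
  rw [h3, PySem.List.slice_natCast]
  congr 2
  omega

-- ===== VERDICT (by name: the statement is the Claim_ definition above) =====
theorem get_all_consequtive_words_from_str_spec : Claim_equal_get_all_consequtive_words_from_str := by
  intro wl _
  unfold Spec_get_all_consequtive_words_from_str
  rw [pv_A_eq, get_all_consequtive_words_from_str_alt, pvOuter_eq, PySem.Set.ofList_eq_foldl]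
  rfl
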